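-- pv_equiv track=rewrite | github.com/Scearp/play-stats | playstats.py | prepend_sum
-- ===== SOURCE A (Python) =====
-- def prepend_sum(x, y, y_daily, trail):
--     y_pre = []
--     if trail > 1:
--         y_pre.append(y_daily[0])
--         for i in range(1, trail):
--             y_pre.append(sum(y_daily[0:i]))
--     x = [x[0] - 1] + x
--     y = [0] + y_pre + y
--     while len(x) < len(y):
--         x.append(x[len(x) - 1] + 1)
--
--     return [x, y]
-- ===== SOURCE B (Python) =====
-- def prepend_sum(x, y, y_daily, trail):
--     # running prefix sum instead of re-summing a growing slice each step
--     x_new = [x[0] - 1] + x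
--     y_new = [0]
--     if trail > 1:
--         y_new.append(y_daily[0])
--         s = 0
--         for i in range(1, trail):
--             if i - 1 < len(y_daily):
--                 s += y_daily[i - 1]
--             y_new.append(s)
--     y_new += y
--     need = len(y_new) - len(x_new)
--     if need > 0:
--         last = x_new[-1]
--         x_new += [last + k for k in range(1, need + 1)]
--     return [x_new, y_new]
-- ===== Notes on version B (the rewrite author's own statement) =====
-- stated objective: faster
-- what changed: Replace A's quadratic re-summing of a growing y_daily slice at every trail step with a single running prefix sum, and replace the element-by-element while-loop extension of x with one computed range comprehension.
import Mathlib
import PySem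

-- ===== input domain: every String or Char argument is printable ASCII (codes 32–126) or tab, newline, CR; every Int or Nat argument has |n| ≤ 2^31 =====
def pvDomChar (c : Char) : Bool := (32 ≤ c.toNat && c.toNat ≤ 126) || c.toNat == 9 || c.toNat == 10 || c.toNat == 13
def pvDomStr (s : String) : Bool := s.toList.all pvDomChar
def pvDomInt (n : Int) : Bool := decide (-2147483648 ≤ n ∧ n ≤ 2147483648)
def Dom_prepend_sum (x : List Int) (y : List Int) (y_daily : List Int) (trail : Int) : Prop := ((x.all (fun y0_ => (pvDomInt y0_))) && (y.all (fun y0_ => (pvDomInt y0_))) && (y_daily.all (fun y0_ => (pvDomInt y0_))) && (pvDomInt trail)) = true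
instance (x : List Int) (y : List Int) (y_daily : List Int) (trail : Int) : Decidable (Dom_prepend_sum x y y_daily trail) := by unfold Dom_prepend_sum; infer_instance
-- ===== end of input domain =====

-- B replaces A's quadratic re-summing of growing slices by one running prefix sum and
-- builds the x-extension in one comprehension instead of a while loop (objective: faster).

-- ===== PORT A =====
-- the while loop appends exactly one element per iteration, so it runs (len y - len x) times
def pvExtendA (xs : List Int) : Nat → List Int
  | 0 => xs
  | n+1 => pvExtendA (xs ++ [xs.getLastD 0 + 1]) n

def prepend_sum (x : List Int) (y : List Int) (y_daily : List Int) (trail : Int) : List (List Int) :=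
  let y_pre : List Int :=
    if trail > 1 then
      -- y_daily[0] : Pre_ guarantees y_daily ≠ [] when trail > 1, so headD is exact
      (PySem.List.pyRange 1 trail 1).foldl
        (fun acc i => acc ++ [(PySem.List.slice y_daily (some 0) (some i)).sum])
        [y_daily.headD 0]
    else []
  let x1 := (x.headD 0 - 1) :: x      -- x[0] : Pre_ guarantees x ≠ []
  let y1 := 0 :: (y_pre ++ y)
  [pvExtendA x1 (y1.length - x1.length), y1]

-- ===== PORT B =====
def prepend_sum_alt (x : List Int) (y : List Int) (y_daily : List Int) (trail : Int) : List (List Int) :=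
  let x1 := (x.headD 0 - 1) :: x      -- x[0] : Pre_ guarantees x ≠ []
  let y1 : List Int :=
    if trail > 1 then
      -- running prefix sum s; y_daily[i-1] with 1 ≤ i, so getD (i-1).toNat is exact
      ((PySem.List.pyRange 1 trail 1).foldl
        (fun (p : Int × List Int) i =>
          let s := if i - 1 < (y_daily.length : Int) then p.1 + y_daily.getD (i-1).toNat 0 else p.1
          (s, p.2 ++ [s]))
        (0, [0, y_daily.headD 0])).2 ++ y
    else [0] ++ y
  let need : Int := (y1.length : Int) - (x1.length : Int)
  let x2 := if need > 0 then
      x1 ++ (PySem.List.pyRange 1 (need + 1) 1).map (fun k => x1.getLastD 0 + k)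
    else x1
  [x2, y1]

-- ===== PRECONDITION & SPEC =====
-- Pre_ excludes exactly the inputs where Python A raises IndexError: empty x (x[0]),
-- and empty y_daily while trail > 1 (y_daily[0]).
def Pre_prepend_sum (x : List Int) (y : List Int) (y_daily : List Int) (trail : Int) : Prop :=
  x ≠ [] ∧ (1 < trail → y_daily ≠ [])
instance (x : List Int) (y : List Int) (y_daily : List Int) (trail : Int) : Decidable (Pre_prepend_sum x y y_daily trail) := by unfold Pre_prepend_sum; infer_instance

def pvWitness_prepend_sum : List Int × List Int × List Int × Int := ([1, 2], [5, 6], [3, 4, 5], 4)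

def Spec_prepend_sum (x : List Int) (y : List Int) (y_daily : List Int) (trail : Int) (out : List (List Int)) : Prop := out = prepend_sum_alt x y y_daily trail
instance (x : List Int) (y : List Int) (y_daily : List Int) (trail : Int) (out : List (List Int)) : Decidable (Spec_prepend_sum x y y_daily trail out) := by unfold Spec_prepend_sum; infer_instance

-- ===== CLAIM (what is proved, stated in full; the proofs are below) =====
def Claim_equal_prepend_sum : Prop := ∀ (x : List Int) (y : List Int) (y_daily : List Int) (trail : Int), Dom_prepend_sum x y y_daily trail → Pre_prepend_sum x y y_daily trail → Spec_prepend_sum x y y_daily trail (prepend_sum x y y_daily trail)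

-- ===== LEMMAS AND PROOFS =====

-- prefix sums: one more element
lemma take_succ_sum (d : List Int) (k : Nat) :
    (d.take (k+1)).sum = (d.take k).sum + (if (k : Int) < (d.length : Int) then d.getD k 0 else 0) := by
  rcases lt_or_ge k d.length with h | h
  · have hc : (k : Int) < (d.length : Int) := by exact_mod_cast h
    rw [List.sum_take_succ d k h, if_pos hc]
    simp [List.getD, List.getElem?_eq_getElem h]
  · have h1 : d.take (k+1) = d := List.take_of_length_le (by omega)
    have h2 : d.take k = d := List.take_of_length_le (by omega)
    have hc : ¬ ((k : Int) < (d.length : Int)) := by exact_mod_cast not_lt.mpr h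
    simp [h1, h2, hc]

-- B's running-sum fold, characterised
lemma bfold_eq (d : List Int) (n : Nat) : ∀ (a b : Int), 1 ≤ a → (b - a).toNat = n →
    ∀ (acc : List Int) (s0 : Int), s0 = (d.take (a-1).toNat).sum →
    ((PySem.List.pyRange a b 1).foldl
      (fun (p : Int × List Int) i =>
        let s := if i - 1 < (d.length : Int) then p.1 + d.getD (i-1).toNat 0 else p.1
        (s, p.2 ++ [s]))
      (s0, acc)).2
    = acc ++ (PySem.List.pyRange a b 1).map (fun i => (d.take i.toNat).sum) := by
  induction n with
  | zero =>
    intro a b ha hn acc s0 hs0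
    rw [PySem.List.pyRange_one_eq_nil (by omega)]
    simp
  | succ n ih =>
    intro a b ha hn acc s0 hs0
    rw [PySem.List.pyRange_one_cons (by omega), List.foldl_cons, List.map_cons]
    have hk : (a - 1).toNat + 1 = a.toNat := by omega
    have hs' : (if a - 1 < (d.length : Int) then s0 + d.getD (a-1).toNat 0 else s0)
        = (d.take a.toNat).sum := by
      rw [hs0, ← hk, take_succ_sum]
      have hcast : (((a - 1).toNat : Nat) : Int) = a - 1 := by omega
      rw [hcast]
      split_ifs <;> simp
    show ((PySem.List.pyRange (a+1) b 1).foldl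
        (fun (p : Int × List Int) i =>
          let s := if i - 1 < (d.length : Int) then p.1 + d.getD (i-1).toNat 0 else p.1
          (s, p.2 ++ [s]))
        ((if a - 1 < (d.length : Int) then s0 + d.getD (a-1).toNat 0 else s0),
         acc ++ [if a - 1 < (d.length : Int) then s0 + d.getD (a-1).toNat 0 else s0])).2 = _
    rw [ih (a+1) b (by omega) (by omega) _ _
      (by rw [hs', show ((a + 1 : Int) - 1).toNat = a.toNat from by omega])]
    rw [hs']
    simp

-- A's while loop, in closed form
lemma pvExtendA_eq (n : Nat) : ∀ (xs : List Int),
    pvExtendA xs n = xs ++ (List.range n).map (fun k : Nat => xs.getLastD 0 + 1 + (k : Int)) := by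
  induction n with
  | zero => intro xs; simp [pvExtendA]
  | succ n ih =>
    intro xs
    rw [pvExtendA, ih, List.range_succ_eq_map, List.getLastD_concat]
    simp only [List.map_cons, List.map_map, List.append_assoc, List.cons_append,
      List.nil_append]
    norm_num
    intro k _
    ring

theorem prepend_sum_spec : Claim_equal_prepend_sum := by
  intro x y y_daily trail _ hpre
  unfold Spec_prepend_sum prepend_sum prepend_sum_alt
  simp only []
  -- the two y lists agree
  have hy : (0 : Int) :: ((if trail > 1 then
        (PySem.List.pyRange 1 trail 1).foldl
          (fun acc i => acc ++ [(PySem.List.slice y_daily (some 0) (some i)).sum])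
          [y_daily.headD 0]
      else []) ++ y)
      = (if trail > 1 then
        ((PySem.List.pyRange 1 trail 1).foldl
          (fun (p : Int × List Int) i =>
            let s := if i - 1 < (y_daily.length : Int) then p.1 + y_daily.getD (i-1).toNat 0 else p.1
            (s, p.2 ++ [s]))
          (0, [0, y_daily.headD 0])).2 ++ y
      else [0] ++ y) := by
    split_ifs with ht
    · rw [PySem.List.foldl_append_singleton_eq_map]
      rw [bfold_eq y_daily (trail - 1).toNat 1 trail (by omega) (by omega) _ _ (by norm_num)]
      have hmap : (PySem.List.pyRange 1 trail 1).map
            (fun i => (PySem.List.slice y_daily (some 0) (some i)).sum)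
          = (PySem.List.pyRange 1 trail 1).map (fun i => (y_daily.take i.toNat).sum) := by
        apply List.map_congr_left
        intro i hi
        have h1 : (1 : Int) ≤ i := (PySem.List.mem_pyRange_one.mp hi).1
        rw [PySem.List.slice_zero_start, PySem.List.slice_to y_daily (by omega : (0:Int) ≤ i)]
      rw [hmap]
      simp
    · simp
  rw [← hy]
  -- the two x lists agree
  congr 1
  set x1 : List Int := (x.headD 0 - 1) :: x with hx1
  set y1 : List Int := (0 : Int) :: ((if trail > 1 then
        (PySem.List.pyRange 1 trail 1).foldl
          (fun acc i => acc ++ [(PySem.List.slice y_daily (some 0) (some i)).sum])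
          [y_daily.headD 0]
      else []) ++ y) with hy1
  have hext := pvExtendA_eq (y1.length - x1.length) x1
  by_cases hneed : ((y1.length : Int) - (x1.length : Int)) > 0
  · rw [if_pos hneed, hext]
    congr 1
    rw [PySem.List.pyRange_one (1) ((y1.length : Int) - (x1.length : Int) + 1)]
    have hnt : ((y1.length : Int) - (x1.length : Int) + 1 - 1).toNat = y1.length - x1.length := by
      omega
    rw [hnt, List.map_map]
    apply List.map_congr_left
    intro k _
    simp [Function.comp]
    ring
  · rw [if_neg hneed]
    have h0 : y1.length - x1.length = 0 := by omega
    rw [h0]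
    simp [pvExtendA]
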